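-- pv_equiv track=rewrite | github.com/luizferreira/cmed | src/wres.theme/wres/theme/skins/wres_theme_scripts/apply_mask.py | getFormatEntities
-- ===== SOURCE A (Python) =====
-- def getFormatEntities(mask):
--     """
--     '(dd)dd-dd' -> ['(', '', '', ')', '', '', '-', '', '', ]
--     'd--d-d' -> ['', '--', '', '-', '']
--     """
--     result = []
--     format_entity = []
--     for character in mask:
--         if character != 'd':
--             format_entity.append(character)
--         else:
--             result.append(''.join(format_entity))
--             format_entity = []
--     return result
-- ===== SOURCE B (Python) =====
-- def getFormatEntities(mask):
--     return mask.split('d')[:-1]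
-- ===== Notes on version B (the rewrite author's own statement) =====
-- stated objective: idiomatic
-- what changed: Replaces the manual character loop with a mutable buffer flushed at each separator by a single str.split on the separator whose trailing piece is dropped with a slice.
import Mathlib
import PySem

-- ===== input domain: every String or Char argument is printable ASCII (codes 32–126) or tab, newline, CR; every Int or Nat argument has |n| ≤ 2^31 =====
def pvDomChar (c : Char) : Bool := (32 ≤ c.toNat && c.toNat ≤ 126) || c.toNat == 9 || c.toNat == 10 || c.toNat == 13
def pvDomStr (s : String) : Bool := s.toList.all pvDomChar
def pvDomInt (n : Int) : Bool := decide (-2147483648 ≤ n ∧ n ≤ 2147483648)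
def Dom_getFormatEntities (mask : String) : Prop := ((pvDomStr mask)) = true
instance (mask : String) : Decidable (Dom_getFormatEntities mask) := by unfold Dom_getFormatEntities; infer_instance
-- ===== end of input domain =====

-- B replaces A's manual buffer-flushing loop by mask.split('d') with the trailing piece dropped (idiomatic decomposition).


-- ===== PORT A =====
-- for character in mask: append to the buffer unless 'd', else flush; ''.join of a char list = String.ofList
def getFormatEntities (mask : String) : List String :=
  (mask.toList.foldl
    (fun (st : List String × List Char) (character : Char) =>
      if character ≠ 'd' then (st.1, st.2 ++ [character])
      else (st.1 ++ [String.ofList st.2], []))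
    ([], [])).1

-- ===== PORT B =====
-- return mask.split('d')[:-1]
def getFormatEntities_alt (mask : String) : List String :=
  match PySem.Str.split? mask "d" with
  | some parts => PySem.List.slice parts none (some (-1))
  | none => []   -- unreachable: the separator "d" is non-empty

-- ===== PRECONDITION & SPEC =====
def Spec_getFormatEntities (mask : String) (out : List String) : Prop := out = getFormatEntities_alt mask
instance (mask : String) (out : List String) : Decidable (Spec_getFormatEntities mask out) := by unfold Spec_getFormatEntities; infer_instance

-- ===== CLAIM (what is proved, stated in full; the proofs are below) =====
def Claim_equal_getFormatEntities : Prop := ∀ (mask : String), Dom_getFormatEntities mask → Spec_getFormatEntities mask (getFormatEntities mask)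

-- ===== LEMMAS AND PROOFS =====

/-- The groups of non-'d' characters ended by each 'd'; `cur` is the pending buffer, reversed. -/
def pvGroups : List Char → List Char → List (List Char)
  | [], _ => []
  | c :: rest, cur => if c = 'd' then cur.reverse :: pvGroups rest [] else pvGroups rest (c :: cur)

theorem pvSlice_neg_one {α : Type} (xs : List α) :
    PySem.List.slice xs none (some (-1)) = xs.dropLast := by
  simp [PySem.List.slice, PySem.List.clampIdx]
  split_ifs with h
  · simp [h]
  · rw [List.dropLast_eq_take]
    congr 1
    have : 0 < xs.length := List.length_pos_iff.mpr h
    omega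

theorem pvGo_dropLast (l : List Char) : ∀ (fuel : Nat) (cur : List Char) (acc : List (List Char)),
    l.length < fuel →
    (PySem.Chars.splitOn.go ['d'] fuel l cur acc).dropLast = acc.reverse ++ pvGroups l cur := by
  induction l with
  | nil =>
    intro fuel cur acc h
    match fuel, h with
    | fuel + 1, _ =>
      simp [PySem.Chars.splitOn.go, pvGroups]
  | cons c rest ih =>
    intro fuel cur acc h
    match fuel, h with
    | fuel + 1, h =>
      simp only [PySem.Chars.splitOn.go]
      by_cases hc : c = 'd'
      · rw [if_pos (by simp [hc, List.isPrefixOf])]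
        rw [show List.drop ['d'].length (c :: rest) = rest from rfl]
        rw [ih fuel [] (cur.reverse :: acc) (by simpa using Nat.lt_of_succ_lt_succ h)]
        simp [pvGroups, hc]
      · rw [if_neg (by simp [List.isPrefixOf]; exact Ne.symm hc)]
        rw [ih fuel (c :: cur) acc (by simpa using Nat.lt_of_succ_lt_succ h)]
        simp [pvGroups, hc]

theorem pvFoldA (l : List Char) : ∀ (res : List String) (fe : List Char),
    (l.foldl
      (fun (st : List String × List Char) (character : Char) =>
        if character ≠ 'd' then (st.1, st.2 ++ [character])
        else (st.1 ++ [String.ofList st.2], []))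
      (res, fe)).1 = res ++ (pvGroups l fe.reverse).map String.ofList := by
  induction l with
  | nil => intro res fe; simp [pvGroups]
  | cons c rest ih =>
    intro res fe
    simp only [List.foldl_cons]
    by_cases hc : c = 'd'
    · simp only [hc, ne_eq, not_true_eq_false, if_false, ih]
      simp [pvGroups]
    · simp only [ne_eq, hc, not_false_eq_true, if_true, ih]
      simp [pvGroups, hc]

-- ===== VERDICT (by name: the statement is the Claim_ definition above) =====
theorem getFormatEntities_spec : Claim_equal_getFormatEntities := by
  intro mask _
  unfold Spec_getFormatEntities getFormatEntities getFormatEntities_alt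
  have h : PySem.Str.split? mask "d"
      = some ((PySem.Chars.splitOn.go ['d'] (mask.toList.length + 1) mask.toList [] []).map String.ofList) := by
    simp [PySem.Str.split?, PySem.Chars.split?, PySem.Chars.splitOn]
  rw [h]
  simp only [pvSlice_neg_one, List.map_dropLast.symm]
  rw [pvGo_dropLast _ _ [] [] (Nat.lt_succ_self _)]
  rw [pvFoldA]
  simp
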